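-- pv_equiv track=rewrite | github.com/Hendori/Rolpens | loopunrollingscripts/level0Unrolling.py | reroll_loops
-- ===== SOURCE A (Python) =====
-- def reroll_loops(code):
--     lines = code.split("\n")
--     new_code = []
--     i = 0
--
--     while i < len(lines):
--         line = lines[i].strip()
--
--         # Skip empty lines
--         if not line:
--             new_code.append("")
--             i += 1
--             continue
--
--         # Find repeated sequences
--         count = 1
--         while i + count < len(lines) and lines[i + count].strip() == line:
--             count += 1
--
--         # If repeated at least twice, replace with a loop
--         if count > 1:
--             new_code.append(f"for (int i = 0; i < {count}; i++) {{")
--             new_code.append(f"    {line}")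
--             new_code.append("}")
--             i += count  # Skip processed lines
--         else:
--             new_code.append(line)
--             i += 1
--
--     return "\n".join(new_code)
-- ===== SOURCE B (Python) =====
-- def reroll_loops(code):
--     out = []
--
--     def flush(key, n):
--         if n == 0:
--             return
--         if not key:
--             out.extend([""] * n)
--         elif n > 1:
--             out.append(f"for (int i = 0; i < {n}; i++) {{")
--             out.append(f"    {key}")
--             out.append("}")
--         else:
--             out.append(key)
--
--     cur, n = None, 0
--     for line in code.split("\n"):
--         s = line.strip()
--         if s == cur:
--             n += 1
--         else:
--             flush(cur, n)
--             cur, n = s, 1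
--     flush(cur, n)
--     return "\n".join(out)
-- ===== Notes on version B (the rewrite author's own statement) =====
-- stated objective: alternative
-- what changed: Replaces A's indexed while-loop with an inner look-ahead scan by a single forward pass carrying a pending (key, count) run accumulator that is flushed when the stripped line changes.
import Mathlib
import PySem

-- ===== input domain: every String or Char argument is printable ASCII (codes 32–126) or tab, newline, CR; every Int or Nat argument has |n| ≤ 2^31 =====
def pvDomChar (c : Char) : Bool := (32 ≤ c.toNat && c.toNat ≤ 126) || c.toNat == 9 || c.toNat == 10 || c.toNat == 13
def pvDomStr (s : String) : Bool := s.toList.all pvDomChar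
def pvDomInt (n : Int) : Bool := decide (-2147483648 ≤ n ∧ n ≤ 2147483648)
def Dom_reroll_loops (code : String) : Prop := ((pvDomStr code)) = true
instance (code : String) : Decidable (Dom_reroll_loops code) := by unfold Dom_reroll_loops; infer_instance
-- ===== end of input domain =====

-- B replaces A's indexed while-loop with inner look-ahead scan by a single-pass
-- run-length accumulator (pending key + count, flushed on change): alternative decomposition, same cost.


-- ===== PORT A =====
-- inner 'while i + count < len(lines) and lines[i+count].strip() == line: count += 1':
-- returns count-1, the number of immediately following lines whose strip equals `line`
def rerollA_scan (line : String) (rest : List String) : Nat :=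
  match rest with
  | [] => 0
  | l :: ls => if PySem.Str.strip l == line then rerollA_scan line ls + 1 else 0

-- the outer while over `lines`, index i rendered as the remaining suffix
def rerollA_go (lines : List String) : List String :=
  match lines with
  | [] => []
  | l :: ls =>
    let line := PySem.Str.strip l
    if line == "" then
      "" :: rerollA_go ls
    else
      let count := 1 + rerollA_scan line ls
      if count > 1 then
        ("for (int i = 0; i < " ++ PySem.Int.toStr (count : Int) ++ "; i++) {")
          :: ("    " ++ line) :: "}" :: rerollA_go (ls.drop (count - 1))
      else
        line :: rerollA_go ls
  termination_by lines.length
  decreasing_by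
    all_goals simp [List.length_drop]

def reroll_loops (code : String) : String :=
  PySem.Str.join "\n" (rerollA_go ((PySem.Str.split? code "\n").getD []))

-- ===== PORT B =====
-- flush(cur, n): emit the pending run (cur = None rendered as Option.none, then n = 0)
def rerollB_flush (cur : Option String) (n : Nat) (out : List String) : List String :=
  if n = 0 then out
  else
    match cur with
    | none => out
    | some key =>
      if key == "" then out ++ List.replicate n ""
      else if n > 1 then
        out ++ [("for (int i = 0; i < " ++ PySem.Int.toStr (n : Int) ++ "; i++) {"),
                ("    " ++ key), "}"]
      else out ++ [key]

-- the for-loop over the lines, carrying (cur, n, out)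
def rerollB_go (lines : List String) (cur : Option String) (n : Nat) (out : List String) :
    List String :=
  match lines with
  | [] => rerollB_flush cur n out
  | l :: ls =>
    let s := PySem.Str.strip l
    if some s == cur then rerollB_go ls cur (n + 1) out
    else rerollB_go ls (some s) 1 (rerollB_flush cur n out)

def reroll_loops_alt (code : String) : String :=
  PySem.Str.join "\n" (rerollB_go ((PySem.Str.split? code "\n").getD []) none 0 [])

-- ===== PRECONDITION & SPEC =====
def Spec_reroll_loops (code : String) (out : String) : Prop := out = reroll_loops_alt code
instance (code : String) (out : String) : Decidable (Spec_reroll_loops code out) := by unfold Spec_reroll_loops; infer_instance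

-- ===== CLAIM (what is proved, stated in full; the proofs are below) =====
def Claim_equal_reroll_loops : Prop := ∀ (code : String), Dom_reroll_loops code → Spec_reroll_loops code (reroll_loops code)

-- ===== LEMMAS AND PROOFS =====

-- what either program emits for a run of n ≥ 1 equal stripped lines with key `key`
def rerollEmit (key : String) (n : Nat) : List String :=
  if key == "" then List.replicate n ""
  else if n > 1 then
    [("for (int i = 0; i < " ++ PySem.Int.toStr (n : Int) ++ "; i++) {"), ("    " ++ key), "}"]
  else [key]

theorem rerollB_flush_some (key : String) (n : Nat) (out : List String) (hn : 1 ≤ n) :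
    rerollB_flush (some key) n out = out ++ rerollEmit key n := by
  unfold rerollB_flush rerollEmit
  have : ¬ n = 0 := by omega
  simp only [this, if_false]
  split_ifs <;> simp

-- A on a run of blanks: one "" per line
theorem rerollA_blank_run (ls : List String) :
    "" :: rerollA_go ls
      = List.replicate (1 + rerollA_scan "" ls) ""
        ++ rerollA_go (ls.drop (rerollA_scan "" ls)) := by
  induction ls with
  | nil => simp [rerollA_scan]
  | cons l ls ih =>
    by_cases h : PySem.Str.strip l == ""
    · have hs : PySem.Str.strip l = "" := by simpa using h
      rw [rerollA_scan.eq_def]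
      simp only [h, if_true]
      have hA : rerollA_go (l :: ls) = "" :: rerollA_go ls := by
        rw [rerollA_go.eq_def]; simp [hs]
      rw [Nat.add_comm, List.replicate_succ]
      simp [hA, ih, Nat.add_comm]
    · rw [rerollA_scan.eq_def]
      simp [h]

-- A's step: one whole run at a time
theorem rerollA_step (l : String) (ls : List String) :
    rerollA_go (l :: ls)
      = rerollEmit (PySem.Str.strip l) (1 + rerollA_scan (PySem.Str.strip l) ls)
        ++ rerollA_go (ls.drop (rerollA_scan (PySem.Str.strip l) ls)) := by
  by_cases h : PySem.Str.strip l == ""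
  · have hs : PySem.Str.strip l = "" := by simpa using h
    rw [rerollA_go.eq_def]
    simp only [hs, beq_self_eq_true, if_true, rerollEmit]
    simpa using rerollA_blank_run ls
  · rw [rerollA_go.eq_def]
    simp only [h, rerollEmit]
    by_cases hc : 1 + rerollA_scan (PySem.Str.strip l) ls > 1
    · simp [hc]
    · have h0 : rerollA_scan (PySem.Str.strip l) ls = 0 := by omega
      simp [h0]

-- B with a pending run (some key, n ≥ 1) finishes the run then behaves like A
theorem rerollB_inv (ls : List String) (key : String) (n : Nat) (out : List String)
    (hn : 1 ≤ n) :
    rerollB_go ls (some key) n out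
      = out ++ rerollEmit key (n + rerollA_scan key ls)
        ++ rerollA_go (ls.drop (rerollA_scan key ls)) := by
  induction ls generalizing key n out with
  | nil =>
    rw [rerollB_go.eq_def, rerollA_scan.eq_def]
    simp [rerollB_flush_some _ _ _ hn, rerollA_go.eq_def]
  | cons l ls ih =>
    rw [rerollB_go.eq_def, rerollA_scan.eq_def]
    by_cases h : PySem.Str.strip l == key
    · have h' : some (PySem.Str.strip l) == some key := by simpa using h
      simp only [h, h', if_true]
      rw [ih key (n + 1) out (by omega)]
      have : n + 1 + rerollA_scan key ls = n + (rerollA_scan key ls + 1) := by omega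
      simp [this]
    · have h' : (some (PySem.Str.strip l) == some key) = false := by
        rw [show (some (PySem.Str.strip l) == some key) = (PySem.Str.strip l == key) from rfl]
        simpa using h
      simp only [h, h', if_false, Bool.false_eq_true]
      rw [rerollB_flush_some _ _ _ hn,
        ih (PySem.Str.strip l) 1 (out ++ rerollEmit key n) (by omega)]
      simp [rerollA_step l ls]

theorem rerollAB (lines : List String) :
    rerollA_go lines = rerollB_go lines none 0 [] := by
  match lines with
  | [] => rw [rerollA_go.eq_def, rerollB_go.eq_def]; simp [rerollB_flush]
  | l :: ls =>
    rw [rerollB_go.eq_def]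
    simp only [show (some (PySem.Str.strip l) == (none : Option String)) = false from rfl,
      if_false, Bool.false_eq_true]
    rw [show rerollB_flush none 0 [] = [] from rfl,
      rerollB_inv ls (PySem.Str.strip l) 1 [] (by omega), rerollA_step]
    simp

-- ===== VERDICT (by name: the statement is the Claim_ definition above) =====
theorem reroll_loops_spec : Claim_equal_reroll_loops := by
  intro code _
  unfold Spec_reroll_loops reroll_loops reroll_loops_alt
  rw [rerollAB]
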